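-- pv_equiv track=rewrite | github.com/LanceNorskog/deep_meter | meter.py | getstress
-- ===== SOURCE A (Python) =====
-- def getstress(words, stresses):
--   stressarray = []
--   for word in words:
--     word = word.lower()
--     stress = stresses.get(word, None)
--     if stress == None:
--       stressarray = []
--       break
--     else:
--       s = ""
--       for st in stress:
--         s = s + st
--       stressarray.append(s)
--   return stressarray
-- ===== SOURCE B (Python) =====
-- def getstress(words, stresses):
--     # Right-to-left fold: acc is None once any lookup failed (failure absorbs),
--     # otherwise the list of joined stress patterns for the remaining suffix,
--     # built back-to-front by prepending.
--     acc = []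
--     for w in reversed(words):
--         v = stresses.get(w.lower())
--         acc = None if (v is None or acc is None) else ["".join(v)] + acc
--     return acc if acc is not None else []
-- ===== Notes on version B (the rewrite author's own statement) =====
-- stated objective: alternative
-- what changed: Replaces A's forward fused loop-with-break-and-accumulator-clearing by a right-to-left fold with an Option-style failure accumulator: failure (None) absorbs, success prepends the joined pattern, so the result is built back-to-front with no break and no accumulator reset.
import Mathlib
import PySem

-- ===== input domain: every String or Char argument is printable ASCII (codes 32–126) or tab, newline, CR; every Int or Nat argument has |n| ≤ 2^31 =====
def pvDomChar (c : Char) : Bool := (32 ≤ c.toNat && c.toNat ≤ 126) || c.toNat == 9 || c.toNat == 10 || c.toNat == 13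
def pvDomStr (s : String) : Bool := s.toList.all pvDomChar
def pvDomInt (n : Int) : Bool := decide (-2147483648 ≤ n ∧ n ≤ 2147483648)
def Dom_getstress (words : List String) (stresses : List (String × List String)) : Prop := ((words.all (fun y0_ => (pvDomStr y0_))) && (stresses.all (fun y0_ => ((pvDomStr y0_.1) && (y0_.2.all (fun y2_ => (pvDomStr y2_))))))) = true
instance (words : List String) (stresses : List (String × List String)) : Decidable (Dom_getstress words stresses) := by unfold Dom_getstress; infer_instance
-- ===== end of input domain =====

-- B replaces A's forward loop-with-break by a right-to-left fold with an absorbing Option failure accumulator; return value only.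

-- ===== PORT A =====
-- the fused loop: look a word up, on a miss clear the accumulator and break, else append the hand-concatenated stress string
def getstressLoop (stresses : PySem.Dict String (List String)) :
    List String → List String → List String
  | [], stressarray => stressarray
  | word :: rest, stressarray =>
    let word := PySem.Str.lower word
    match stresses.get? word with
    | none => []                                  -- stressarray = []; break
    | some stress =>
        -- s = ""; for st in stress: s = s + st   (string concat done on the code-point lists, exact)
        let s := stress.foldl (fun s st => s ++ st.toList) ([] : List Char)
        getstressLoop stresses rest (stressarray ++ [String.ofList s])

def getstress (words : List String) (stresses : List (String × List String)) : List String :=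
  getstressLoop (PySem.Dict.mk stresses) words []

-- ===== PORT B =====
-- acc = None if (v is None or acc is None) else ["".join(v)] + acc, over reversed(words)
def getstressStep (d : PySem.Dict String (List String))
    (acc : Option (List String)) (w : String) : Option (List String) :=
  match d.get? (PySem.Str.lower w), acc with
  | some v, some r => some (PySem.Str.join "" v :: r)
  | _, _ => none

def getstress_alt (words : List String) (stresses : List (String × List String)) : List String :=
  let d := PySem.Dict.mk stresses
  let acc := words.reverse.foldl (getstressStep d) (some [])
  acc.getD []

-- ===== PRECONDITION & SPEC =====
def Spec_getstress (words : List String) (stresses : List (String × List String)) (out : List String) : Prop := out = getstress_alt words stresses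
instance (words : List String) (stresses : List (String × List String)) (out : List String) : Decidable (Spec_getstress words stresses out) := by unfold Spec_getstress; infer_instance

-- ===== CLAIM (what is proved, stated in full; the proofs are below) =====
def Claim_equal_getstress : Prop := ∀ (words : List String) (stresses : List (String × List String)), Dom_getstress words stresses → Spec_getstress words stresses (getstress words stresses)

-- ===== LEMMAS AND PROOFS =====

theorem intercalate_nil_eq_flatten (css : List (List Char)) :
    List.intercalate [] css = css.flatten := by
  induction css with
  | nil => simp [List.intercalate]
  | cons x t ih =>
    cases t with
    | nil => simp [List.intercalate]
    | cons y u =>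
      simp [List.intercalate, List.intersperse] at *
      simpa [List.intercalate, List.intersperse] using ih

-- A's hand-rolled character accumulation equals B's "".join
theorem ofList_foldl_eq_join (l : List String) :
    String.ofList (l.foldl (fun s st => s ++ st.toList) ([] : List Char)) = PySem.Str.join "" l := by
  rw [PySem.List.foldl_append_eq_flatMap, PySem.Str.join]
  congr 1
  simp [PySem.Chars.join, intercalate_nil_eq_flatten, List.flatMap_def]

-- characterisation of B's reversed fold (as a foldr)
theorem foldr_step_spec (d : PySem.Dict String (List String)) (ws : List String) :
    ws.foldr (fun w acc => getstressStep d acc w) (some []) =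
      if ws.any (fun w => (d.get? (PySem.Str.lower w)).isNone) then none
      else some (ws.map (fun w => PySem.Str.join "" ((d.get? (PySem.Str.lower w)).getD []))) := by
  induction ws with
  | nil => simp
  | cons w rest ih =>
    simp only [List.foldr_cons, ih, List.any_cons, List.map_cons]
    cases h : d.get? (PySem.Str.lower w) with
    | none =>
      simp only [h, Option.isNone_none, Bool.true_or, if_true]
      split_ifs <;> simp [getstressStep, h]
    | some v =>
      simp only [h, Option.isNone_some, Bool.false_or, Option.getD_some]
      split_ifs <;> simp [getstressStep, h]

-- characterisation of A's loop
theorem getstressLoop_spec (d : PySem.Dict String (List String)) (ws : List String)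
    (acc : List String) :
    getstressLoop d ws acc =
      if ws.any (fun w => (d.get? (PySem.Str.lower w)).isNone) then []
      else acc ++ ws.map (fun w => PySem.Str.join "" ((d.get? (PySem.Str.lower w)).getD [])) := by
  induction ws generalizing acc with
  | nil => simp [getstressLoop]
  | cons w rest ih =>
    simp only [getstressLoop, List.any_cons, List.map_cons]
    cases h : d.get? (PySem.Str.lower w) with
    | none => simp [h]
    | some stress =>
      simp only [h, Option.isNone_some, Bool.false_or, ih, Option.getD_some,
        ofList_foldl_eq_join]
      split_ifs with hc
      · rfl
      · simp

-- ===== VERDICT (by name: the statement is the Claim_ definition above) =====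
theorem getstress_spec : Claim_equal_getstress := by
  intro words stresses _
  unfold Spec_getstress getstress getstress_alt
  simp only [List.foldl_reverse, getstressLoop_spec, foldr_step_spec, List.nil_append]
  split_ifs <;> rfl
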